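-- pv_equiv track=rewrite | github.com/yuvz/AcceleratedSearchProj | EnvironmentUtils.py | get_vertex_conflicts
-- ===== SOURCE A (Python) =====
-- def get_vertex_conflicts(plan):
--     conflicts = []
--     for i in range(len(plan)):
--         for j in range(len(plan)):
--             if i <= j:
--                 continue
--
--             for time in range(min(len(plan[i]), len(plan[j]))):
--                 is_agent_at_source = plan[i][time] == plan[i][0]
--                 is_agent_at_destination = plan[i][time] == plan[i][-1]
--
--                 if is_agent_at_source or is_agent_at_destination:
--                     continue
--
--                 if plan[i][time] == plan[j][time]:
--                     conflicts.append((time, i, j, plan[i][time]))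
--     return conflicts
-- ===== SOURCE B (Python) =====
-- def get_vertex_conflicts(plan):
--     # Per-timestep hashing: bucket agents by position, emit same-bucket pairs,
--     # then sort into A's (i, j, time) emission order.
--     horizon = 0
--     for path in plan:
--         horizon = max(horizon, len(path))
--     conflicts = []
--     for t in range(horizon):
--         buckets = {}
--         for a, path in enumerate(plan):
--             if t < len(path):
--                 buckets.setdefault(path[t], []).append(a)
--         for pos, agents in buckets.items():
--             for k, i in enumerate(agents):
--                 if pos != plan[i][0] and pos != plan[i][-1]:
--                     for j in agents[:k]:
--                         conflicts.append((t, i, j, pos))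
--     conflicts.sort(key=lambda c: (c[1], c[2], c[0]))
--     return conflicts
-- ===== Notes on version B (the rewrite author's own statement) =====
-- stated objective: faster
-- what changed: Replaces the all-pairs O(A^2*T) scan by per-timestep hashing of agents into position buckets (emitting only same-bucket pairs) followed by one sort into A's (i, j, time) emission order.
import Mathlib
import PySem

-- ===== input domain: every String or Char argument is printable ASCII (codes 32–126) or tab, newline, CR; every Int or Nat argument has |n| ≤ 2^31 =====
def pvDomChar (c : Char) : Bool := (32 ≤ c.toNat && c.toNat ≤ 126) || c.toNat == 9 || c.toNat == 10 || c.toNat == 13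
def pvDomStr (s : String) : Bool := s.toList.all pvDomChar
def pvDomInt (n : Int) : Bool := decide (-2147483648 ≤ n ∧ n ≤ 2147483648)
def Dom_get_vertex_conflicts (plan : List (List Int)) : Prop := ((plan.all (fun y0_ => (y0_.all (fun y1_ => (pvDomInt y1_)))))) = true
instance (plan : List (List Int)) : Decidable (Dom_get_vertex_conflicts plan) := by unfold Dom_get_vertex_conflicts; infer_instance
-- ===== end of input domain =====

-- B replaces A's all-pairs scan by per-timestep bucketing of agents by position plus a final
-- sort into A's (i, j, time) emission order; return values agree on every input.

-- ===== PORT A =====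
def get_vertex_conflicts (plan : List (List Int)) : List (Int × Int × Int × Int) :=
  (PySem.List.pyRange 0 (plan.length : Int) 1).foldl (fun conflicts i =>
    (PySem.List.pyRange 0 (plan.length : Int) 1).foldl (fun conflicts j =>
      if i ≤ j then conflicts
      else
        (PySem.List.pyRange 0
            (min ((PySem.List.pyGetD plan i []).length : Int) ((PySem.List.pyGetD plan j []).length : Int)) 1).foldl
          (fun conflicts time =>
            let is_agent_at_source :=
              PySem.List.pyGetD (PySem.List.pyGetD plan i []) time 0 == PySem.List.pyGetD (PySem.List.pyGetD plan i []) 0 0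
            let is_agent_at_destination :=
              PySem.List.pyGetD (PySem.List.pyGetD plan i []) time 0 == PySem.List.pyGetD (PySem.List.pyGetD plan i []) (-1) 0
            if is_agent_at_source || is_agent_at_destination then conflicts
            else if PySem.List.pyGetD (PySem.List.pyGetD plan i []) time 0
                      == PySem.List.pyGetD (PySem.List.pyGetD plan j []) time 0 then
              conflicts ++ [(time, i, j, PySem.List.pyGetD (PySem.List.pyGetD plan i []) time 0)]
            else conflicts)
          conflicts)
      conflicts)
    []

-- ===== PORT B =====
-- sort key: Python's tuple (c[1], c[2], c[0]) compared lexicographically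
def pvAltKey (c : Int × Int × Int × Int) : Lex (Int × Lex (Int × Int)) :=
  toLex (c.2.1, toLex (c.2.2.1, c.1))

-- the per-timestep dict: buckets.setdefault(path[t], []).append(a)
def pvAltBuckets (plan : List (List Int)) (t : Int) : PySem.Dict Int (List Int) :=
  (PySem.List.enumerate plan).foldl
    (fun buckets p =>
      if t < (p.2.length : Int) then buckets.modify (PySem.List.pyGetD p.2 t 0) [] (· ++ [p.1])
      else buckets)
    PySem.Dict.empty

-- the `conflicts` list as built before the final sort
def pvAltConflicts (plan : List (List Int)) : List (Int × Int × Int × Int) :=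
  let horizon : Int := plan.foldl (fun acc path => max acc ((path.length : Int))) 0
  (PySem.List.pyRange 0 horizon 1).foldl (fun conflicts t =>
    ((pvAltBuckets plan t).items).foldl (fun conflicts q =>
      (PySem.List.enumerate q.2).foldl (fun conflicts ki =>
        if q.1 ≠ PySem.List.pyGetD (PySem.List.pyGetD plan ki.2 []) 0 0 ∧
           q.1 ≠ PySem.List.pyGetD (PySem.List.pyGetD plan ki.2 []) (-1) 0 then
          (PySem.List.slice q.2 none (some ki.1)).foldl
            (fun conflicts j => conflicts ++ [(t, ki.2, j, q.1)]) conflicts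
        else conflicts) conflicts) conflicts) []

def get_vertex_conflicts_alt (plan : List (List Int)) : List (Int × Int × Int × Int) :=
  PySem.List.sorted (pvAltConflicts plan) pvAltKey

-- ===== PRECONDITION & SPEC =====
def Spec_get_vertex_conflicts (plan : List (List Int)) (out : List (Int × Int × Int × Int)) : Prop := out = get_vertex_conflicts_alt plan
instance (plan : List (List Int)) (out : List (Int × Int × Int × Int)) : Decidable (Spec_get_vertex_conflicts plan out) := by unfold Spec_get_vertex_conflicts; infer_instance

-- ===== CLAIM (what is proved, stated in full; the proofs are below) =====
def Claim_equal_get_vertex_conflicts : Prop := ∀ (plan : List (List Int)), Dom_get_vertex_conflicts plan → Spec_get_vertex_conflicts plan (get_vertex_conflicts plan)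

-- ===== LEMMAS AND PROOFS =====

-- abbreviations for the values both programs look at
def pvN (plan : List (List Int)) : Int := (plan.length : Int)
def pvRow (plan : List (List Int)) (i : Int) : List Int := PySem.List.pyGetD plan i []
def pvLen (plan : List (List Int)) (i : Int) : Int := ((pvRow plan i).length : Int)
def pvV (plan : List (List Int)) (i t : Int) : Int := PySem.List.pyGetD (pvRow plan i) t 0
def pvSrc (plan : List (List Int)) (i : Int) : Int := PySem.List.pyGetD (pvRow plan i) 0 0
def pvDst (plan : List (List Int)) (i : Int) : Int := PySem.List.pyGetD (pvRow plan i) (-1) 0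
def pvHorizon (plan : List (List Int)) : Int := plan.foldl (fun acc path => max acc ((path.length : Int))) 0

-- the common characterisation of an emitted conflict
def pvGood (plan : List (List Int)) (x : Int × Int × Int × Int) : Prop :=
  ∃ i j t : Int, 0 ≤ j ∧ j < i ∧ i < pvN plan ∧ 0 ≤ t ∧ t < min (pvLen plan i) (pvLen plan j) ∧
    pvV plan i t ≠ pvSrc plan i ∧ pvV plan i t ≠ pvDst plan i ∧ pvV plan i t = pvV plan j t ∧
    x = (t, i, j, pvV plan i t)

-- canonical shapes
def pvGIn (plan : List (List Int)) (i j : Int) : List (Int × Int × Int × Int) :=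
  ((PySem.List.pyRange 0 (min (pvLen plan i) (pvLen plan j)) 1).filter
     (fun time => !(pvV plan i time == pvSrc plan i || pvV plan i time == pvDst plan i)
                  && (pvV plan i time == pvV plan j time))).map
    (fun time => (time, i, j, pvV plan i time))

def pvPt (plan : List (List Int)) (t : Int) : List (Int × Int) :=
  ((PySem.List.enumerate plan).filter (fun p => decide (t < (p.2.length : Int)))).map
    (fun p => (PySem.List.pyGetD p.2 t 0, p.1))

def pvAgents (plan : List (List Int)) (t pos : Int) : List Int :=
  ((pvPt plan t).filter (fun p => p.1 == pos)).map (·.2)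

def pvBucketBlock (plan : List (List Int)) (t : Int) (q : Int × List Int) : List (Int × Int × Int × Int) :=
  (PySem.List.enumerate q.2).flatMap (fun ki =>
    if q.1 ≠ pvSrc plan ki.2 ∧ q.1 ≠ pvDst plan ki.2 then
      (PySem.List.slice q.2 none (some ki.1)).map (fun j => (t, ki.2, j, q.1))
    else [])

def pvTBlock (plan : List (List Int)) (t : Int) : List (Int × Int × Int × Int) :=
  ((PySem.Set.ofList ((pvPt plan t).map (·.1))).map (fun pos => (pos, pvAgents plan t pos))).flatMap
    (pvBucketBlock plan t)

-- ---- canonical-shape lemmas ----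
theorem pvA_flat (plan : List (List Int)) :
    get_vertex_conflicts plan
      = (PySem.List.pyRange 0 (pvN plan) 1).flatMap (fun i =>
          (PySem.List.pyRange 0 (pvN plan) 1).flatMap (fun j =>
            if i ≤ j then [] else pvGIn plan i j)) := by
  have h1 : ∀ (i j : Int) (acc : List (Int × Int × Int × Int)),
      (PySem.List.pyRange 0
          (min ((PySem.List.pyGetD plan i []).length : Int) ((PySem.List.pyGetD plan j []).length : Int)) 1).foldl
        (fun conflicts time =>
            let is_agent_at_source :=
              PySem.List.pyGetD (PySem.List.pyGetD plan i []) time 0 == PySem.List.pyGetD (PySem.List.pyGetD plan i []) 0 0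
            let is_agent_at_destination :=
              PySem.List.pyGetD (PySem.List.pyGetD plan i []) time 0 == PySem.List.pyGetD (PySem.List.pyGetD plan i []) (-1) 0
            if is_agent_at_source || is_agent_at_destination then conflicts
            else if PySem.List.pyGetD (PySem.List.pyGetD plan i []) time 0
                      == PySem.List.pyGetD (PySem.List.pyGetD plan j []) time 0 then
              conflicts ++ [(time, i, j, PySem.List.pyGetD (PySem.List.pyGetD plan i []) time 0)]
            else conflicts) acc
        = acc ++ pvGIn plan i j := by
    intro i j acc
    refine (PySem.List.foldl_congr_mem _ _
      (fun conflicts time =>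
        if !(pvV plan i time == pvSrc plan i || pvV plan i time == pvDst plan i)
             && (pvV plan i time == pvV plan j time) then
          conflicts ++ [(time, i, j, pvV plan i time)] else conflicts) acc ?_).trans ?_
    · intro acc time _
      simp only [pvV, pvSrc, pvDst, pvRow]
      cases hsd : (PySem.List.pyGetD (PySem.List.pyGetD plan i []) time 0 == PySem.List.pyGetD (PySem.List.pyGetD plan i []) 0 0
          || PySem.List.pyGetD (PySem.List.pyGetD plan i []) time 0 == PySem.List.pyGetD (PySem.List.pyGetD plan i []) (-1) 0) <;>
        simp_all
    · rw [PySem.List.foldl_append_if]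
      rfl
  have h2 : ∀ (i : Int) (acc : List (Int × Int × Int × Int)),
      (PySem.List.pyRange 0 (plan.length : Int) 1).foldl (fun conflicts j =>
        if i ≤ j then conflicts
        else
          (PySem.List.pyRange 0
              (min ((PySem.List.pyGetD plan i []).length : Int) ((PySem.List.pyGetD plan j []).length : Int)) 1).foldl
            (fun conflicts time =>
              let is_agent_at_source :=
                PySem.List.pyGetD (PySem.List.pyGetD plan i []) time 0 == PySem.List.pyGetD (PySem.List.pyGetD plan i []) 0 0
              let is_agent_at_destination :=
                PySem.List.pyGetD (PySem.List.pyGetD plan i []) time 0 == PySem.List.pyGetD (PySem.List.pyGetD plan i []) (-1) 0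
              if is_agent_at_source || is_agent_at_destination then conflicts
              else if PySem.List.pyGetD (PySem.List.pyGetD plan i []) time 0
                        == PySem.List.pyGetD (PySem.List.pyGetD plan j []) time 0 then
                conflicts ++ [(time, i, j, PySem.List.pyGetD (PySem.List.pyGetD plan i []) time 0)]
              else conflicts) conflicts) acc
        = acc ++ (PySem.List.pyRange 0 (plan.length : Int) 1).flatMap (fun j =>
            if i ≤ j then [] else pvGIn plan i j) := by
    intro i acc
    refine (PySem.List.foldl_congr_mem _ _
      (fun conflicts j => conflicts ++ (if i ≤ j then [] else pvGIn plan i j)) acc ?_).trans ?_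
    · intro acc j _
      split_ifs with h
      · simp [h]
      · show _ = acc ++ (if i ≤ j then [] else pvGIn plan i j)
        rw [if_neg h]
        exact h1 i j acc
    · exact PySem.List.foldl_append_eq_flatMap _ _ _
  unfold get_vertex_conflicts
  refine (PySem.List.foldl_congr_mem _ _
    (fun conflicts i => conflicts ++ (PySem.List.pyRange 0 (plan.length : Int) 1).flatMap (fun j =>
        if i ≤ j then [] else pvGIn plan i j)) [] ?_).trans ?_
  · intro acc i _
    show _ = acc ++ _
    exact h2 i acc
  · rw [PySem.List.foldl_append_eq_flatMap]
    rfl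

theorem pvBuckets_fold (plan : List (List Int)) (t : Int) :
    pvAltBuckets plan t
      = (pvPt plan t).foldl (fun d q => d.modify q.1 [] (· ++ [q.2])) PySem.Dict.empty := by
  unfold pvAltBuckets pvPt
  refine Eq.trans (PySem.List.foldl_ite_eq_foldl_filter (fun p => t < ((p.2.length : Int)))
    (fun buckets p => buckets.modify (PySem.List.pyGetD p.2 t 0) [] (· ++ [p.1]))
    (PySem.List.enumerate plan) PySem.Dict.empty) ?_
  rw [List.foldl_map]

theorem pvBuckets_keys (plan : List (List Int)) (t : Int) :
    (pvAltBuckets plan t).keys = PySem.Set.ofList ((pvPt plan t).map (·.1)) := by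
  rw [pvBuckets_fold]
  rw [PySem.Dict.keys_foldl_modify_key (pvPt plan t) (fun q => q.1) [] (fun _ q => (· ++ [q.2]))]
  simp [PySem.Set.update_nil_left]

theorem pvBuckets_getD (plan : List (List Int)) (t pos : Int) :
    (pvAltBuckets plan t).getD pos [] = pvAgents plan t pos := by
  rw [pvBuckets_fold, PySem.Dict.getD_foldl_modify_append]
  simp [pvAgents]

theorem pvBuckets_items (plan : List (List Int)) (t : Int) :
    (pvAltBuckets plan t).items
      = (PySem.Set.ofList ((pvPt plan t).map (·.1))).map (fun pos => (pos, pvAgents plan t pos)) := by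
  have hnd : (pvAltBuckets plan t).keys.Nodup := by
    rw [pvBuckets_keys]; exact PySem.Set.nodup_ofList _
  rw [PySem.Dict.items_eq_map_keys _ hnd [], pvBuckets_keys]
  refine List.map_congr_left ?_
  intro pos _
  rw [pvBuckets_getD]

theorem pvB0_flat (plan : List (List Int)) :
    pvAltConflicts plan = (PySem.List.pyRange 0 (pvHorizon plan) 1).flatMap (pvTBlock plan) := by
  have hki : ∀ (t : Int) (q : Int × List Int) (acc : List (Int × Int × Int × Int)),
      (PySem.List.enumerate q.2).foldl (fun conflicts ki =>
        if q.1 ≠ PySem.List.pyGetD (PySem.List.pyGetD plan ki.2 []) 0 0 ∧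
           q.1 ≠ PySem.List.pyGetD (PySem.List.pyGetD plan ki.2 []) (-1) 0 then
          (PySem.List.slice q.2 none (some ki.1)).foldl
            (fun conflicts j => conflicts ++ [(t, ki.2, j, q.1)]) conflicts
        else conflicts) acc = acc ++ pvBucketBlock plan t q := by
    intro t q acc
    refine (PySem.List.foldl_congr_mem _ _
      (fun conflicts ki => conflicts ++
        (if q.1 ≠ pvSrc plan ki.2 ∧ q.1 ≠ pvDst plan ki.2 then
          (PySem.List.slice q.2 none (some ki.1)).map (fun j => (t, ki.2, j, q.1))
        else [])) acc ?_).trans ?_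
    · intro acc ki _
      simp only [pvSrc, pvDst, pvRow]
      split_ifs with h
      · exact PySem.List.foldl_append_singleton_eq_map _ _ _
      · simp
    · rw [PySem.List.foldl_append_eq_flatMap]
      rfl
  have hq : ∀ (t : Int) (acc : List (Int × Int × Int × Int)),
      ((pvAltBuckets plan t).items).foldl (fun conflicts q =>
        (PySem.List.enumerate q.2).foldl (fun conflicts ki =>
          if q.1 ≠ PySem.List.pyGetD (PySem.List.pyGetD plan ki.2 []) 0 0 ∧
             q.1 ≠ PySem.List.pyGetD (PySem.List.pyGetD plan ki.2 []) (-1) 0 then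
            (PySem.List.slice q.2 none (some ki.1)).foldl
              (fun conflicts j => conflicts ++ [(t, ki.2, j, q.1)]) conflicts
          else conflicts) conflicts) acc = acc ++ pvTBlock plan t := by
    intro t acc
    refine (PySem.List.foldl_congr_mem _ _
      (fun conflicts q => conflicts ++ pvBucketBlock plan t q) acc ?_).trans ?_
    · intro acc q _
      exact hki t q acc
    · rw [PySem.List.foldl_append_eq_flatMap, pvBuckets_items]
      rfl
  unfold pvAltConflicts
  refine (PySem.List.foldl_congr_mem _ _
    (fun conflicts t => conflicts ++ pvTBlock plan t) [] ?_).trans ?_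
  · intro acc t _
    show _ = acc ++ _
    exact hq t acc
  · rw [PySem.List.foldl_append_eq_flatMap]
    rfl

-- ---- facts about pvPt / pvAgents ----
theorem pvRow_natCast (plan : List (List Int)) (k : Nat) (hk : k < plan.length) :
    pvRow plan (k : Int) = plan[k] := by
  simp [pvRow, List.getD_eq_getElem?_getD, List.getElem?_eq_getElem hk]

theorem pvMem_Pt (plan : List (List Int)) (t pos a : Int) :
    (pos, a) ∈ pvPt plan t ↔ 0 ≤ a ∧ a < pvN plan ∧ t < pvLen plan a ∧ pos = pvV plan a t := by
  unfold pvPt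
  simp only [List.mem_map, List.mem_filter, PySem.List.mem_enumerate_iff, decide_eq_true_eq]
  constructor
  · rintro ⟨q, ⟨⟨k, hk, rfl⟩, hlt⟩, hpq⟩
    have hrow := pvRow_natCast plan k hk
    have h2 : a = ((k : Int)) := by
      have := congrArg Prod.snd hpq; simpa using this.symm
    have h1 : pos = PySem.List.pyGetD plan[k] t 0 := by
      have := congrArg Prod.fst hpq; simpa using this.symm
    subst h2
    refine ⟨Int.natCast_nonneg k, by unfold pvN; exact_mod_cast hk, ?_, ?_⟩
    · show t < ((pvRow plan (k : Int)).length : Int)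
      rw [hrow]; simpa using hlt
    · show pos = PySem.List.pyGetD (pvRow plan (k : Int)) t 0
      rw [hrow]; exact h1
  · rintro ⟨h0, hn, hlt, hv⟩
    obtain ⟨k, rfl⟩ := Int.eq_ofNat_of_zero_le h0
    have hk : k < plan.length := by
      have hn' : ((k : Int)) < ((plan.length : Nat) : Int) := hn
      exact_mod_cast hn'
    have hrow := pvRow_natCast plan k hk
    refine ⟨((k : Int), plan[k]), ⟨⟨k, hk, by simp⟩, ?_⟩, ?_⟩
    · show t < ((plan[k] : List Int).length : Int)
      rw [← hrow]
      exact hlt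
    · show (PySem.List.pyGetD plan[k] t 0, (k : Int)) = (pos, (k : Int))
      rw [← hrow]
      exact congrArg (fun z => (z, (k : Int))) hv.symm

theorem pvMem_agents (plan : List (List Int)) (t pos a : Int) :
    a ∈ pvAgents plan t pos ↔ 0 ≤ a ∧ a < pvN plan ∧ t < pvLen plan a ∧ pvV plan a t = pos := by
  unfold pvAgents
  simp only [List.mem_map, List.mem_filter, beq_iff_eq]
  constructor
  · rintro ⟨⟨p1, p2⟩, ⟨hmem, rfl⟩, rfl⟩
    obtain ⟨h0, hn, hlt, hv⟩ := (pvMem_Pt plan t p1 p2).mp hmem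
    exact ⟨h0, hn, hlt, hv.symm⟩
  · rintro ⟨h0, hn, hlt, hv⟩
    exact ⟨(pos, a), ⟨(pvMem_Pt plan t pos a).mpr ⟨h0, hn, hlt, hv.symm⟩, rfl⟩, rfl⟩

theorem pvAgents_pairwise (plan : List (List Int)) (t pos : Int) :
    (pvAgents plan t pos).Pairwise (· < ·) := by
  unfold pvAgents pvPt
  rw [List.pairwise_map]
  refine List.Pairwise.filter _ ?_
  rw [List.pairwise_map]
  refine List.Pairwise.filter _ ?_
  exact PySem.List.pairwise_lt_enumerate plan 0

-- take on a strictly increasing list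
theorem pvMem_take_sorted {l : List Int} (hl : l.Pairwise (· < ·)) {k : Nat} (hk : k < l.length) (x : Int) :
    x ∈ l.take k ↔ x ∈ l ∧ x < l[k] := by
  induction l generalizing k with
  | nil => simp at hk
  | cons y ys ih =>
    rcases List.pairwise_cons.mp hl with ⟨hy, hys⟩
    cases k with
    | zero =>
      simp only [List.take_zero, List.getElem_cons_zero, List.not_mem_nil, false_iff]
      rintro ⟨hmem, hlt⟩
      rcases List.mem_cons.mp hmem with rfl | hmem'
      · exact lt_irrefl _ hlt
      · exact absurd hlt (not_lt.mpr (le_of_lt (hy _ hmem')))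
    | succ k =>
      have hk' : k < ys.length := by simpa using hk
      simp only [List.take_succ_cons, List.mem_cons, List.getElem_cons_succ, ih hys hk']
      constructor
      · rintro (rfl | ⟨hmem, hlt⟩)
        · exact ⟨Or.inl rfl, hy _ (List.getElem_mem hk')⟩
        · exact ⟨Or.inr hmem, hlt⟩
      · rintro ⟨rfl | hmem, hlt⟩
        · exact Or.inl rfl
        · exact Or.inr ⟨hmem, hlt⟩

theorem pvLen_le_horizon (plan : List (List Int)) (i : Int) (h0 : 0 ≤ i) (hn : i < pvN plan) :
    pvLen plan i ≤ pvHorizon plan := by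
  obtain ⟨k, rfl⟩ := Int.eq_ofNat_of_zero_le h0
  have hk : k < plan.length := by
    have hn' : ((k : Int)) < ((plan.length : Nat) : Int) := hn
    exact_mod_cast hn'
  have hrow := pvRow_natCast plan k hk
  have hmem : plan[k] ∈ plan := List.getElem_mem hk
  have h := (PySem.List.le_foldl_max_int plan (fun path => ((path.length : Int))) 0).2 _ hmem
  unfold pvLen pvHorizon
  rw [hrow]
  exact h

theorem pvMem_A (plan : List (List Int)) (x : Int × Int × Int × Int) :
    x ∈ get_vertex_conflicts plan ↔ pvGood plan x := by
  rw [pvA_flat]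
  unfold pvGood
  simp only [List.mem_flatMap, PySem.List.mem_pyRange_one]
  constructor
  · rintro ⟨i, ⟨h0i, hin⟩, j, ⟨h0j, hjn⟩, hx⟩
    rcases lt_or_ge j i with hji | hij
    · rw [if_neg (not_le.mpr hji)] at hx
      unfold pvGIn at hx
      obtain ⟨time, htf, rfl⟩ := List.mem_map.mp hx
      obtain ⟨htr, hcond⟩ := List.mem_filter.mp htf
      obtain ⟨h0t, htm⟩ := PySem.List.mem_pyRange_one.mp htr
      simp only [Bool.and_eq_true, Bool.not_eq_true', Bool.or_eq_false_iff, beq_iff_eq,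
        beq_eq_false_iff_ne] at hcond
      exact ⟨i, j, time, h0j, hji, hin, h0t, htm, hcond.1.1, hcond.1.2, hcond.2, rfl⟩
    · rw [if_pos hij] at hx
      simp at hx
  · rintro ⟨i, j, t, h0j, hji, hin, h0t, htm, hsrc, hdst, heq, rfl⟩
    refine ⟨i, ⟨le_trans h0j (le_of_lt hji), hin⟩, j, ⟨h0j, lt_trans hji hin⟩, ?_⟩
    rw [if_neg (not_le.mpr hji)]
    unfold pvGIn
    refine List.mem_map.mpr ⟨t, List.mem_filter.mpr ⟨PySem.List.mem_pyRange_one.mpr ⟨h0t, htm⟩, ?_⟩, rfl⟩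
    simp only [Bool.and_eq_true, Bool.not_eq_true', Bool.or_eq_false_iff, beq_iff_eq,
      beq_eq_false_iff_ne]
    exact ⟨⟨hsrc, hdst⟩, heq⟩

theorem pvMem_B0 (plan : List (List Int)) (x : Int × Int × Int × Int) :
    x ∈ pvAltConflicts plan ↔ pvGood plan x := by
  rw [pvB0_flat]
  unfold pvGood
  simp only [List.mem_flatMap, PySem.List.mem_pyRange_one]
  constructor
  · rintro ⟨t, ⟨h0t, hth⟩, hx⟩
    unfold pvTBlock at hx
    obtain ⟨q, hq, hxq⟩ := List.mem_flatMap.mp hx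
    obtain ⟨pos, hposmem, rfl⟩ := List.mem_map.mp hq
    unfold pvBucketBlock at hxq
    obtain ⟨ki, hki, hxki⟩ := List.mem_flatMap.mp hxq
    obtain ⟨k, hk, rfl⟩ := (PySem.List.mem_enumerate_iff _ _ _).mp hki
    split_ifs at hxki with hc
    · obtain ⟨j, hjmem, rfl⟩ := List.mem_map.mp hxki
      have hsl : PySem.List.slice (pvAgents plan t pos) none (some ((0 : Int) + (k : Int)))
          = (pvAgents plan t pos).take k := by
        rw [zero_add, PySem.List.slice_to_natCast]
      rw [hsl] at hjmem
      rw [pvMem_take_sorted (pvAgents_pairwise plan t pos) hk] at hjmem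
      obtain ⟨hjag, hjlt⟩ := hjmem
      have hiag : (pvAgents plan t pos)[k] ∈ pvAgents plan t pos := List.getElem_mem hk
      obtain ⟨h0i, hin, hti, hvi⟩ := (pvMem_agents plan t pos _).mp hiag
      obtain ⟨h0j, hjn, htj, hvj⟩ := (pvMem_agents plan t pos j).mp hjag
      refine ⟨(pvAgents plan t pos)[k], j, t, h0j, hjlt, hin, h0t, lt_min hti htj, ?_, ?_, ?_, ?_⟩
      · rw [hvi]; exact hc.1
      · rw [hvi]; exact hc.2
      · rw [hvi, hvj]
      · rw [hvi]
    · simp at hxki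
  · rintro ⟨i, j, t, h0j, hji, hin, h0t, htm, hsrc, hdst, heq, rfl⟩
    have hti : t < pvLen plan i := lt_of_lt_of_le htm (min_le_left _ _)
    have htj : t < pvLen plan j := lt_of_lt_of_le htm (min_le_right _ _)
    have h0i : 0 ≤ i := le_trans h0j (le_of_lt hji)
    refine ⟨t, ⟨h0t, lt_of_lt_of_le hti (pvLen_le_horizon plan i h0i hin)⟩, ?_⟩
    unfold pvTBlock
    have hiag : i ∈ pvAgents plan t (pvV plan i t) :=
      (pvMem_agents plan t _ i).mpr ⟨h0i, hin, hti, rfl⟩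
    have hjag : j ∈ pvAgents plan t (pvV plan i t) :=
      (pvMem_agents plan t _ j).mpr ⟨h0j, lt_trans hji hin, htj, heq.symm⟩
    refine List.mem_flatMap.mpr ⟨(pvV plan i t, pvAgents plan t (pvV plan i t)), ?_, ?_⟩
    · refine List.mem_map.mpr ⟨pvV plan i t, ?_, rfl⟩
      refine (PySem.Set.mem_ofList _ _).mpr ?_
      exact List.mem_map.mpr ⟨(pvV plan i t, i),
        (pvMem_Pt plan t (pvV plan i t) i).mpr ⟨h0i, hin, hti, rfl⟩, rfl⟩
    · unfold pvBucketBlock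
      obtain ⟨k, hk, hik⟩ := List.mem_iff_getElem.mp hiag
      refine List.mem_flatMap.mpr ⟨((0 : Int) + (k : Int), (pvAgents plan t (pvV plan i t))[k]),
        (PySem.List.mem_enumerate_iff _ _ _).mpr ⟨k, hk, rfl⟩, ?_⟩
      rw [if_pos (by rw [hik]; exact ⟨hsrc, hdst⟩)]
      refine List.mem_map.mpr ⟨j, ?_, by rw [hik]⟩
      have hsl : PySem.List.slice (pvAgents plan t (pvV plan i t)) none (some ((0 : Int) + (k : Int)))
          = (pvAgents plan t (pvV plan i t)).take k := by
        rw [zero_add, PySem.List.slice_to_natCast]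
      rw [hsl, pvMem_take_sorted (pvAgents_pairwise plan t _) hk]
      exact ⟨hjag, by rw [hik]; exact hji⟩

-- ---- order and distinctness ----
theorem pvKey_lt (a b : Int × Int × Int × Int) :
    pvAltKey a < pvAltKey b
      ↔ a.2.1 < b.2.1 ∨ (a.2.1 = b.2.1 ∧ (a.2.2.1 < b.2.2.1 ∨ (a.2.2.1 = b.2.2.1 ∧ a.1 < b.1))) := by
  simp [pvAltKey, Prod.Lex.toLex_lt_toLex]

theorem pvGIn_pairwise (plan : List (List Int)) (i j : Int) :
    (pvGIn plan i j).Pairwise (fun a b => pvAltKey a < pvAltKey b) := by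
  unfold pvGIn
  rw [List.pairwise_map]
  refine List.Pairwise.filter _ ?_
  refine List.Pairwise.imp ?_ (PySem.List.pairwise_lt_pyRange_one _ _)
  intro t u h
  rw [pvKey_lt]
  exact Or.inr ⟨rfl, Or.inr ⟨rfl, h⟩⟩

theorem pvMem_ite_gIn (plan : List (List Int)) {i j : Int} {x : Int × Int × Int × Int}
    (hx : x ∈ (if i ≤ j then ([] : List (Int × Int × Int × Int)) else pvGIn plan i j)) :
    x.2.1 = i ∧ x.2.2.1 = j := by
  by_cases h : i ≤ j
  · rw [if_pos h] at hx; simp at hx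
  · rw [if_neg h] at hx
    unfold pvGIn at hx
    obtain ⟨t, -, rfl⟩ := List.mem_map.mp hx
    exact ⟨rfl, rfl⟩

theorem pvPairwise_A (plan : List (List Int)) :
    (get_vertex_conflicts plan).Pairwise (fun a b => pvAltKey a < pvAltKey b) := by
  rw [pvA_flat, List.pairwise_flatMap]
  constructor
  · intro i _
    rw [List.pairwise_flatMap]
    constructor
    · intro j _
      by_cases h : i ≤ j
      · rw [if_pos h]; exact List.Pairwise.nil
      · rw [if_neg h]; exact pvGIn_pairwise plan i j
    · refine List.Pairwise.imp ?_ (PySem.List.pairwise_lt_pyRange_one _ _)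
      intro j j' hjj x hx y hy
      obtain ⟨hxi, hxj⟩ := pvMem_ite_gIn plan hx
      obtain ⟨hyi, hyj⟩ := pvMem_ite_gIn plan hy
      rw [pvKey_lt]
      exact Or.inr ⟨hxi.trans hyi.symm, Or.inl (by omega)⟩
  · refine List.Pairwise.imp ?_ (PySem.List.pairwise_lt_pyRange_one _ _)
    intro i i' hii x hx y hy
    obtain ⟨j, -, hxj⟩ := List.mem_flatMap.mp hx
    obtain ⟨j', -, hyj⟩ := List.mem_flatMap.mp hy
    rw [pvKey_lt]
    left
    rw [(pvMem_ite_gIn plan hxj).1, (pvMem_ite_gIn plan hyj).1]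
    exact hii

theorem pvMem_kiBlock_shape (plan : List (List Int)) (t : Int) (q : Int × List Int)
    (ki : Int × Int) (x : Int × Int × Int × Int)
    (hx : x ∈ (if q.1 ≠ pvSrc plan ki.2 ∧ q.1 ≠ pvDst plan ki.2 then
        (PySem.List.slice q.2 none (some ki.1)).map (fun j => (t, ki.2, j, q.1))
      else ([] : List (Int × Int × Int × Int)))) :
    x.1 = t ∧ x.2.1 = ki.2 ∧ x.2.2.2 = q.1 := by
  split_ifs at hx
  · obtain ⟨j, -, rfl⟩ := List.mem_map.mp hx
    exact ⟨rfl, rfl, rfl⟩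
  · simp at hx

theorem pvMem_bucketBlock_shape (plan : List (List Int)) (t : Int) (q : Int × List Int)
    (x : Int × Int × Int × Int) (hx : x ∈ pvBucketBlock plan t q) :
    x.1 = t ∧ x.2.2.2 = q.1 := by
  unfold pvBucketBlock at hx
  obtain ⟨ki, -, hxki⟩ := List.mem_flatMap.mp hx
  exact ⟨(pvMem_kiBlock_shape plan t q ki x hxki).1, (pvMem_kiBlock_shape plan t q ki x hxki).2.2⟩

theorem pvBucketBlock_pairwise_ne (plan : List (List Int)) (t pos : Int) :
    (pvBucketBlock plan t (pos, pvAgents plan t pos)).Pairwise (· ≠ ·) := by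
  have hpw := pvAgents_pairwise plan t pos
  unfold pvBucketBlock
  rw [List.pairwise_flatMap]
  constructor
  · intro ki hki
    obtain ⟨k, hk, rfl⟩ := (PySem.List.mem_enumerate_iff _ _ _).mp hki
    split_ifs with hc
    · rw [List.pairwise_map]
      have hsl : PySem.List.slice (pvAgents plan t pos) none (some ((0 : Int) + (k : Int)))
          = (pvAgents plan t pos).take k := by
        rw [zero_add, PySem.List.slice_to_natCast]
      rw [hsl]
      refine List.Pairwise.imp ?_ (hpw.sublist (List.take_sublist ..))
      intro a b hab heq
      have := congrArg (fun z => z.2.2.1) heq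
      simp at this
      omega
    · exact List.Pairwise.nil
  · have h2 : (PySem.List.enumerate (pvAgents plan t pos)).Pairwise (fun p q' => p.2 < q'.2) := by
      rw [← List.pairwise_map (f := fun p : Int × Int => p.2) (R := (· < ·)),
        PySem.List.map_snd_enumerate]
      exact hpw
    refine List.Pairwise.imp ?_ h2
    intro ki ki' hlt x hx y hy heq
    have hxs := (pvMem_kiBlock_shape plan t _ ki x hx).2.1
    have hys := (pvMem_kiBlock_shape plan t _ ki' y hy).2.1
    rw [heq, hys] at hxs
    omega

theorem pvTBlock_pairwise_ne (plan : List (List Int)) (t : Int) :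
    (pvTBlock plan t).Pairwise (· ≠ ·) := by
  unfold pvTBlock
  rw [List.pairwise_flatMap]
  constructor
  · intro q hq
    obtain ⟨pos, -, rfl⟩ := List.mem_map.mp hq
    exact pvBucketBlock_pairwise_ne plan t pos
  · rw [List.pairwise_map]
    refine List.Pairwise.imp ?_ (PySem.Set.nodup_ofList _)
    intro pos pos' hne x hx y hy heq
    have hx4 := (pvMem_bucketBlock_shape plan t _ x hx).2
    have hy4 := (pvMem_bucketBlock_shape plan t _ y hy).2
    apply hne
    rw [heq, hy4] at hx4
    exact hx4.symm

theorem pvMem_tBlock_shape (plan : List (List Int)) (t : Int) (x : Int × Int × Int × Int)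
    (hx : x ∈ pvTBlock plan t) : x.1 = t := by
  unfold pvTBlock at hx
  obtain ⟨q, -, hxq⟩ := List.mem_flatMap.mp hx
  exact (pvMem_bucketBlock_shape plan t q x hxq).1

theorem pvNodup_B0 (plan : List (List Int)) : (pvAltConflicts plan).Nodup := by
  rw [pvB0_flat]
  show List.Pairwise _ _
  rw [List.pairwise_flatMap]
  constructor
  · intro t _
    exact pvTBlock_pairwise_ne plan t
  · refine List.Pairwise.imp ?_ (PySem.List.pairwise_lt_pyRange_one _ _)
    intro t t' hlt x hx y hy heq
    have hxs := pvMem_tBlock_shape plan t x hx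
    have hys := pvMem_tBlock_shape plan t' y hy
    rw [heq, hys] at hxs
    omega

theorem pvNodup_A (plan : List (List Int)) : (get_vertex_conflicts plan).Nodup :=
  (pvPairwise_A plan).imp (fun h => by
    intro he; subst he; exact lt_irrefl _ h)

theorem pvPerm (plan : List (List Int)) : (get_vertex_conflicts plan).Perm (pvAltConflicts plan) :=
  (List.perm_ext_iff_of_nodup (pvNodup_A plan) (pvNodup_B0 plan)).mpr
    (fun a => by rw [pvMem_A, pvMem_B0])

-- ===== VERDICT (by name: the statement is the Claim_ definition above) =====
theorem get_vertex_conflicts_spec : Claim_equal_get_vertex_conflicts := by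
  intro plan _
  unfold Spec_get_vertex_conflicts get_vertex_conflicts_alt
  exact (PySem.List.sorted_eq_of_perm_of_pairwise_lt (pvAltConflicts plan)
    (get_vertex_conflicts plan) pvAltKey (pvPerm plan) (pvPairwise_A plan)).symm
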